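-- pv_equiv track=rewrite | github.com/sha-alam/Information-Theory-and-Codding | lab4.py | decode_data
-- ===== SOURCE A (Python) =====
-- def decode_data(encoded_data):
--     m = 0
--     while 2 ** m < len(encoded_data):
--         m += 1
--
--     decoded_data = []
--     j = 0
--     for i in range(1, len(encoded_data) + 1):
--         if i == 2 ** j:
--             j += 1
--         else:
--             decoded_data.append(encoded_data[i - 1])
--
--     return ''.join(decoded_data)
-- ===== SOURCE B (Python) =====
-- def decode_data(encoded_data):
--     parts = []
--     j = 1
--     while 2 ** j < len(encoded_data):
--         parts.append(encoded_data[2 ** j : 2 ** (j + 1) - 1])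
--         j += 1
--     return ''.join(parts)
-- ===== Notes on version B (the rewrite author's own statement) =====
-- stated objective: faster
-- what changed: Instead of testing every position 1..n against the next power of two and appending characters one by one (plus a dead m-computation loop), B loops over the O(log n) powers of two and appends the whole slice of data bits between consecutive parity positions, joining the slices at the end.
import Mathlib
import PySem

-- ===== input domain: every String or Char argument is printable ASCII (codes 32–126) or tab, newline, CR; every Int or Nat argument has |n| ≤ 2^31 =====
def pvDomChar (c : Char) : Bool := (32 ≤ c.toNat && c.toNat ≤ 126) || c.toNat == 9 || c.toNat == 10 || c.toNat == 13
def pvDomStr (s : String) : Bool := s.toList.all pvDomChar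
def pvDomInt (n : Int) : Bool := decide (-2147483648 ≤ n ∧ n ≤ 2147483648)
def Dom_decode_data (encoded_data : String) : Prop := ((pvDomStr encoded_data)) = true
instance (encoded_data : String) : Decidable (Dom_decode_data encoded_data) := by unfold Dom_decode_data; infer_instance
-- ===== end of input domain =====

-- B replaces A's per-character loop (with its dead `m` computation) by a loop over the
-- powers of two that concatenates the data runs between parity positions (objective: simpler).

-- ===== PORT A =====
-- the dead `m = 0; while 2 ** m < len(encoded_data): m += 1` loop of A
def pvComputeM (n m : Nat) : Nat :=
  if 2 ^ m < n then pvComputeM n (m + 1) else m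
termination_by n - m
decreasing_by
  have := Nat.lt_two_pow_self (n := m); omega

def decode_data (encoded_data : String) : String :=
  let cs := encoded_data.toList
  let _m := pvComputeM cs.length 0
  let st :=
    (PySem.List.pyRange 1 ((cs.length : Int) + 1) 1).foldl
      (fun (st : Nat × List Char) (i : Int) =>
        if i = (2 : Int) ^ st.1 then (st.1 + 1, st.2)
        else (st.1, st.2 ++ (PySem.List.pyGet? cs (i - 1)).toList))
      (0, ([] : List Char))
  String.mk st.2

-- ===== PORT B =====
-- the `while 2 ** j < len(encoded_data)` loop of B, concatenating the slices it appends
def pvAltLoop (cs : List Char) (j : Nat) : List Char :=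
  if 2 ^ j < cs.length then
    PySem.List.slice cs (some ((2 : Int) ^ j)) (some ((2 : Int) ^ (j + 1) - 1))
      ++ pvAltLoop cs (j + 1)
  else []
termination_by cs.length - 2 ^ j
decreasing_by
  have h1 : 2 ^ j < 2 ^ (j + 1) := Nat.pow_lt_pow_right (by omega) (Nat.lt_succ_self j)
  omega

def decode_data_alt (encoded_data : String) : String :=
  String.mk (pvAltLoop encoded_data.toList 1)

-- ===== PRECONDITION & SPEC =====
def Spec_decode_data (encoded_data : String) (out : String) : Prop := out = decode_data_alt encoded_data
instance (encoded_data : String) (out : String) : Decidable (Spec_decode_data encoded_data out) := by unfold Spec_decode_data; infer_instance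

-- ===== CLAIM (what is proved, stated in full; the proofs are below) =====
def Claim_equal_decode_data : Prop := ∀ (encoded_data : String), Dom_decode_data encoded_data → Spec_decode_data encoded_data (decode_data encoded_data)

-- ===== LEMMAS AND PROOFS =====

-- A's loop body, named for the proofs
def pvF (cs : List Char) (st : Nat × List Char) (i : Int) : Nat × List Char :=
  if i = (2 : Int) ^ st.1 then (st.1 + 1, st.2)
  else (st.1, st.2 ++ (PySem.List.pyGet? cs (i - 1)).toList)

-- a run of indices [a, b) that stays strictly below the current parity position 2^j
theorem pvRun (cs : List Char) (j : Nat) : ∀ (a b : Nat) (acc : List Char),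
    1 ≤ a → a ≤ b → b ≤ 2 ^ j → b ≤ cs.length + 1 →
    (PySem.List.pyRange (a : Int) (b : Int) 1).foldl (pvF cs) (j, acc)
      = (j, acc ++ (cs.drop (a - 1)).take (b - a)) := by
  intro a b
  induction hk : b - a generalizing a with
  | zero =>
    intro acc h1 h2 h3 h4
    rw [PySem.List.pyRange_one_eq_nil (by omega)]
    simp
  | succ k ih =>
    intro acc h1 h2 h3 h4
    rw [PySem.List.pyRange_one_cons (by omega)]
    have hne : (a : Int) ≠ (2 : Int) ^ j := by
      have ha : (a : Int) < (2 : Int) ^ j := by exact_mod_cast (show a < 2 ^ j by omega)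
      exact ne_of_lt ha
    have hlt : a - 1 < cs.length := by omega
    have hget : PySem.List.pyGet? cs ((a : Int) - 1) = some cs[a - 1] := by
      have : ((a : Int) - 1) = ((a - 1 : Nat) : Int) := by omega
      rw [this, PySem.List.pyGet?_natCast, List.getElem?_eq_getElem hlt]
    simp only [List.foldl_cons, pvF, if_neg hne, hget, Option.toList_some]
    rw [show ((a : Int) + 1) = ((a + 1 : Nat) : Int) by push_cast; ring]
    rw [ih (a + 1) (by omega) (acc ++ [cs[a - 1]]) (by omega) (by omega) h3 h4]
    have hdrop : cs.drop (a - 1) = cs[a - 1] :: cs.drop a := by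
      have hsub : a - 1 + 1 = a := by omega
      rw [List.drop_eq_getElem_cons hlt, hsub]
    rw [hdrop, show a + 1 - 1 = a from rfl, List.take_succ_cons]
    simp

-- one full segment of A's loop: the parity position 2^j, then the data run up to the
-- next parity position (or the end of the string)
theorem pvSeg (cs : List Char) (j : Nat) (acc : List Char) (h : 2 ^ j ≤ cs.length) :
    (PySem.List.pyRange ((2 ^ j : Nat) : Int) ((cs.length : Int) + 1) 1).foldl (pvF cs) (j, acc)
      = (PySem.List.pyRange ((2 ^ (j + 1) : Nat) : Int) ((cs.length : Int) + 1) 1).foldl (pvF cs)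
          (j + 1, acc ++ (cs.drop (2 ^ j)).take (2 ^ (j + 1) - 1 - 2 ^ j)) := by
  set n := cs.length with hn
  have hpow : 2 ^ j < 2 ^ (j + 1) := Nat.pow_lt_pow_right (by omega) (Nat.lt_succ_self j)
  rw [PySem.List.pyRange_one_cons
        (by exact_mod_cast (show (2 ^ j : Nat) < n + 1 by omega))]
  rw [show (((2 ^ j : Nat) : Int) + 1) = ((2 ^ j + 1 : Nat) : Int) by push_cast; ring]
  rw [PySem.List.pyRange_one_append ((2 ^ j + 1 : Nat) : Int)
        ((min (2 ^ (j + 1)) (n + 1) : Nat) : Int) ((n : Int) + 1)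
        (by exact_mod_cast (show 2 ^ j + 1 ≤ min (2 ^ (j + 1)) (n + 1) by omega))
        (by exact_mod_cast (show (min (2 ^ (j + 1)) (n + 1) : Nat) ≤ n + 1 by omega))]
  rw [List.foldl_cons, List.foldl_append]
  have hfirst : pvF cs (j, acc) ((2 ^ j : Nat) : Int) = (j + 1, acc) := by
    simp [pvF]
  rw [hfirst]
  rw [pvRun cs (j + 1) (2 ^ j + 1) (min (2 ^ (j + 1)) (n + 1)) acc
        (by omega) (by omega) (by omega) (by omega)]
  have hseg : (cs.drop (2 ^ j + 1 - 1)).take (min (2 ^ (j + 1)) (n + 1) - (2 ^ j + 1))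
      = (cs.drop (2 ^ j)).take (2 ^ (j + 1) - 1 - 2 ^ j) := by
    rw [show 2 ^ j + 1 - 1 = 2 ^ j by omega]
    by_cases hc : 2 ^ (j + 1) ≤ n + 1
    · rw [min_eq_left hc]
      congr 1
      omega
    · rw [min_eq_right (by omega)]
      have hlen : (cs.drop (2 ^ j)).length = n - 2 ^ j := by simp [hn]
      rw [List.take_of_length_le (by omega), List.take_of_length_le (by omega)]
  rw [hseg]
  by_cases hc : 2 ^ (j + 1) ≤ n + 1
  · rw [show (min (2 ^ (j + 1)) (n + 1) : Nat) = 2 ^ (j + 1) from min_eq_left hc]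
  · rw [show (min (2 ^ (j + 1)) (n + 1) : Nat) = n + 1 from min_eq_right (by omega)]
    rw [PySem.List.pyRange_one_eq_nil
          (show ((n : Int) + 1) ≤ ((n + 1 : Nat) : Int) by push_cast; omega)]
    rw [PySem.List.pyRange_one_eq_nil
          (by exact_mod_cast (show (n : Nat) + 1 ≤ 2 ^ (j + 1) by omega) : ((n : Int) + 1) ≤ ((2 ^ (j + 1) : Nat) : Int))]

-- A's loop from parity position 2^j onwards computes acc ++ B's loop from j
theorem pvMain (cs : List Char) : ∀ (k j : Nat) (acc : List Char),
    cs.length + 1 - 2 ^ j ≤ k →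
    ((PySem.List.pyRange ((2 ^ j : Nat) : Int) ((cs.length : Int) + 1) 1).foldl
        (pvF cs) (j, acc)).2 = acc ++ pvAltLoop cs j := by
  intro k
  induction k with
  | zero =>
    intro j acc hk
    rw [PySem.List.pyRange_one_eq_nil
          (by exact_mod_cast (show cs.length + 1 ≤ 2 ^ j by omega))]
    rw [pvAltLoop, if_neg (by omega)]
    simp
  | succ k ih =>
    intro j acc hk
    have hpow : 2 ^ j < 2 ^ (j + 1) := Nat.pow_lt_pow_right (by omega) (Nat.lt_succ_self j)
    by_cases h : 2 ^ j ≤ cs.length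
    · rw [pvSeg cs j acc h]
      rw [ih (j + 1) _ (by omega)]
      by_cases h2 : 2 ^ j < cs.length
      · conv_rhs => rw [pvAltLoop]
        rw [if_pos h2]
        have hsl : PySem.List.slice cs (some ((2 : Int) ^ j)) (some ((2 : Int) ^ (j + 1) - 1))
            = (cs.drop (2 ^ j)).take (2 ^ (j + 1) - 1 - 2 ^ j) := by
          rw [show ((2 : Int) ^ j) = ((2 ^ j : Nat) : Int) by push_cast; ring,
              show ((2 : Int) ^ (j + 1) - 1) = ((2 ^ (j + 1) - 1 : Nat) : Int) by
                rw [Nat.cast_sub Nat.one_le_two_pow]; push_cast; ring]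
          rw [PySem.List.slice_natCast]
        rw [hsl, List.append_assoc]
      · -- 2^j = cs.length: the segment's data run is empty and both loops stop
        have he : 2 ^ j = cs.length := by omega
        have ht : (cs.drop (2 ^ j)).take (2 ^ (j + 1) - 1 - 2 ^ j) = [] := by
          rw [he, List.drop_length, List.take_nil]
        rw [ht, List.append_nil]
        rw [pvAltLoop, if_neg (by omega)]
        conv_rhs => rw [pvAltLoop]
        rw [if_neg (by omega), List.append_nil]
    · rw [PySem.List.pyRange_one_eq_nil
            (by exact_mod_cast (show cs.length + 1 ≤ 2 ^ j by omega))]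
      rw [pvAltLoop, if_neg (by omega)]
      simp

-- B starts at j = 1; A's j = 0 segment contributes no data characters
theorem pvAltLoop_zero (cs : List Char) : pvAltLoop cs 0 = pvAltLoop cs 1 := by
  rw [pvAltLoop]
  by_cases h : 2 ^ 0 < cs.length
  · rw [if_pos h]
    have : PySem.List.slice cs (some ((2 : Int) ^ 0)) (some ((2 : Int) ^ (0 + 1) - 1)) = [] := by
      rw [show ((2 : Int) ^ 0) = ((1 : Nat) : Int) by norm_num,
          show ((2 : Int) ^ (0 + 1) - 1) = ((1 : Nat) : Int) by norm_num]
      rw [PySem.List.slice_natCast]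
      simp
    rw [this, List.nil_append]
  · rw [if_neg h]
    rw [pvAltLoop, if_neg (by have := h; omega)]

-- ===== VERDICT (by name: the statement is the Claim_ definition above) =====
theorem decode_data_spec : Claim_equal_decode_data := by
  intro s _
  unfold Spec_decode_data
  have h1 : decode_data s = String.mk
      ((PySem.List.pyRange ((2 ^ 0 : Nat) : Int) ((s.toList.length : Int) + 1) 1).foldl
        (pvF s.toList) (0, ([] : List Char))).2 := rfl
  rw [h1, pvMain s.toList (s.toList.length + 1) 0 [] (by omega), List.nil_append,
      pvAltLoop_zero]
  rfl
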